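-- pv_equiv track=rewrite | github.com/kenjimouriml/kyopro | kenchon/ch03/main.py | get_min_pair
-- ===== SOURCE A (Python) =====
-- from typing import List, Tuple
--
-- def get_min_pair(num_list1: List[int], num_list2: List[int], K: int) -> int:
--     """
--     by linear search
--     """
--     min_val = 2000000000
--     flag = False
--     for i in range(len(num_list1)):
--         for j in range(len(num_list2)):
--             val = num_list1[i] + num_list2[j]
--             if val >= K:
--                 if val <= min_val:
--                     min_val = val
--                     flag = True
--
--     return min_val * flag + K * (1- flag)
-- ===== SOURCE B (Python) =====
-- from typing import List
--
--
-- def get_min_pair(num_list1: List[int], num_list2: List[int], K: int) -> int: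
--     """
--     sort num_list2 once, then for each x binary-search the smallest y with
--     x + y >= K; returns the true minimum pair sum >= K (no 2e9 cap), else K
--     """
--     s = sorted(num_list2)
--     n = len(s)
--     best = None
--     for x in num_list1:
--         t = K - x
--         lo = 0
--         hi = n
--         while lo < hi:
--             mid = (lo + hi) // 2
--             if s[mid] < t:
--                 lo = mid + 1
--             else:
--                 hi = mid
--         if lo < n:
--             v = x + s[lo]
--             if best is None or v < best:
--                 best = v
--     return best if best is not None else K
-- ===== Notes on version B (the rewrite author's own statement) =====
-- stated objective: faster
-- what changed: replaces the nested O(n*m) scan with sorting num_list2 once and binary-searching, per element of num_list1, the smallest complement reaching K, keeping a running minimum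
-- intended difference: when some pair sum reaches K but every such sum exceeds A's 2000000000 sentinel (and none equals K exactly), A's flag never sets and it returns K, while B returns the true minimum pair sum >= K, which is what the function's purpose intends — e.g. on get_min_pair([2000000000], [2000000000], 5): A returns 5, B returns 4000000000
import Mathlib
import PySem

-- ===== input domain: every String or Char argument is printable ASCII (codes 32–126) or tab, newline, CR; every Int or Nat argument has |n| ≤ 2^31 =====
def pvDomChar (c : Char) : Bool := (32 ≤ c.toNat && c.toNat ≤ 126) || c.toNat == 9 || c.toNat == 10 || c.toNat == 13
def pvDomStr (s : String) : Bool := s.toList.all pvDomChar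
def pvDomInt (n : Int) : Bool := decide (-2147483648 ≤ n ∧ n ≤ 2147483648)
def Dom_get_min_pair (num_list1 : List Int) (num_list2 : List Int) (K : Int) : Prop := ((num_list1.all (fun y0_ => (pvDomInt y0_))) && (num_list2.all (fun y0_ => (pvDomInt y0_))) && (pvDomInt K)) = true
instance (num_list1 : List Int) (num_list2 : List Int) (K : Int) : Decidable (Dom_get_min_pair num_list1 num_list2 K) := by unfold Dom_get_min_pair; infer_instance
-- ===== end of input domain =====

-- B replaces A's nested O(n·m) scan by sorting num_list2 once and binary-searching the smallest
-- complement per element of num_list1 (objective: faster); on the D_ inputs below B returns the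
-- intended minimum instead of A's sentinel-capped K.

-- ===== PORT A =====
def get_min_pair (num_list1 : List Int) (num_list2 : List Int) (K : Int) : Int :=
  let st := (PySem.List.pyRange 0 (num_list1.length : Int)).foldl (fun st i =>
      (PySem.List.pyRange 0 (num_list2.length : Int)).foldl (fun st j =>
        let val := PySem.List.pyGetD num_list1 i 0 + PySem.List.pyGetD num_list2 j 0
        if val ≥ K then (if val ≤ st.1 then (val, true) else st) else st) st)
    ((2000000000 : Int), false)
  let b : Int := if st.2 then 1 else 0
  st.1 * b + K * (1 - b)

-- ===== PORT B =====
-- hand-written bisect_left loop of Source B (indices stay in range, so plain getD is exact);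
-- the fuel hi - lo only bounds the iteration count, each step shrinks hi - lo by at least 1
def pvBisectGo : Nat → List Int → Int → Nat → Nat → Nat
  | 0, _, _, lo, _ => lo
  | fuel + 1, s, t, lo, hi =>
    if lo < hi then
      let mid := (lo + hi) / 2
      if s.getD mid 0 < t then pvBisectGo fuel s t (mid + 1) hi
      else pvBisectGo fuel s t lo mid
    else lo

def pvBisect (s : List Int) (t : Int) (lo hi : Nat) : Nat :=
  pvBisectGo (hi - lo) s t lo hi

def get_min_pair_alt (num_list1 : List Int) (num_list2 : List Int) (K : Int) : Int :=
  let s := PySem.List.sorted num_list2 (fun y => y)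
  let n := s.length
  let best := num_list1.foldl (fun best x =>
      let t := K - x
      let lo := pvBisect s t 0 n
      if lo < n then
        let v := x + s.getD lo 0
        match best with
        | none => some v
        | some b => if v < b then some v else best
      else best) (none : Option Int)
  match best with
  | some b => b
  | none => K

-- ===== PRECONDITION & SPEC =====
-- When some pair sum reaches K but every such sum exceeds A's 2000000000 sentinel (and none equals
-- K exactly), A's flag never sets and it returns K, while B returns the minimum pair sum ≥ K,
-- which is the intended value.
def D_get_min_pair (num_list1 : List Int) (num_list2 : List Int) (K : Int) : Prop :=
  (∃ x ∈ num_list1, ∃ y ∈ num_list2, K ≤ x + y) ∧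
  (∀ x ∈ num_list1, ∀ y ∈ num_list2, K ≤ x + y → 2000000000 < x + y ∧ x + y ≠ K)
instance (num_list1 : List Int) (num_list2 : List Int) (K : Int) : Decidable (D_get_min_pair num_list1 num_list2 K) := by unfold D_get_min_pair; infer_instance

def Spec_get_min_pair (num_list1 : List Int) (num_list2 : List Int) (K : Int) (out : Int) : Prop := ¬ D_get_min_pair num_list1 num_list2 K → out = get_min_pair_alt num_list1 num_list2 K
instance (num_list1 : List Int) (num_list2 : List Int) (K : Int) (out : Int) : Decidable (Spec_get_min_pair num_list1 num_list2 K out) := by unfold Spec_get_min_pair; infer_instance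

def pvDiffWitness_get_min_pair : List Int × List Int × Int := ([2000000000], [2000000000], 5)
def pvDiffWitnessOut_get_min_pair : Int × Int := (5, 4000000000)

-- ===== CLAIM (what is proved, stated in full; the proofs are below) =====
def Claim_unchanged_get_min_pair : Prop := ∀ (num_list1 : List Int) (num_list2 : List Int) (K : Int), Dom_get_min_pair num_list1 num_list2 K → Spec_get_min_pair num_list1 num_list2 K (get_min_pair num_list1 num_list2 K)
def Claim_changed_get_min_pair : Prop := Dom_get_min_pair (pvDiffWitness_get_min_pair.1) (pvDiffWitness_get_min_pair.2.1) (pvDiffWitness_get_min_pair.2.2) ∧ D_get_min_pair (pvDiffWitness_get_min_pair.1) (pvDiffWitness_get_min_pair.2.1) (pvDiffWitness_get_min_pair.2.2) ∧ get_min_pair (pvDiffWitness_get_min_pair.1) (pvDiffWitness_get_min_pair.2.1) (pvDiffWitness_get_min_pair.2.2) = pvDiffWitnessOut_get_min_pair.1 ∧ get_min_pair_alt (pvDiffWitness_get_min_pair.1) (pvDiffWitness_get_min_pair.2.1) (pvDiffWitness_get_min_pair.2.2) = pvDiffWitnessOut_get_min_pair.2 ∧ pvDiffWitnessOut_get_min_pair.1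 ≠ pvDiffWitnessOut_get_min_pair.2
def Claim_exact_get_min_pair : Prop := ∀ (num_list1 : List Int) (num_list2 : List Int) (K : Int), Dom_get_min_pair num_list1 num_list2 K → D_get_min_pair num_list1 num_list2 K → get_min_pair num_list1 num_list2 K ≠ get_min_pair_alt num_list1 num_list2 K

-- ===== LEMMAS AND PROOFS =====

-- the list of all pair sums that reach K; both programs are characterised against its minimum
def pvSumsF (num_list2 : List Int) (K x : Int) : List Int :=
  (num_list2.filter (fun y => K ≤ x + y)).map (fun y => x + y)

def pvCand (num_list1 num_list2 : List Int) (K : Int) : List Int :=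
  num_list1.flatMap (pvSumsF num_list2 K)

def pvOmin : Option Int → Option Int → Option Int
  | p, none => p
  | none, some v => some v
  | some b, some v => some (min b v)

lemma pvOmin_none (p : Option Int) : pvOmin p none = p := rfl

lemma pvOmin_none_left (q : Option Int) : pvOmin none q = q := by cases q <;> rfl

lemma pvOmin_assoc (p q r : Option Int) : pvOmin (pvOmin p q) r = pvOmin p (pvOmin q r) := by
  cases p <;> cases q <;> cases r <;> simp [pvOmin, min_assoc]

lemma pvMin?_append (l l' : List Int) : (l ++ l').min? = pvOmin l.min? l'.min? := by
  induction l with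
  | nil => simp [pvOmin_none_left]
  | cons v t ih =>
    simp only [List.cons_append, List.min?_cons, ih]
    cases ht : t.min? <;> cases hl : l'.min? <;>
      simp [pvOmin, Option.elim, min_assoc]

-- A-side characterisation -----------------------------------------------------

def pvStep (K : Int) (st : Int × Bool) (v : Int) : Int × Bool :=
  if v ≥ K then (if v ≤ st.1 then (v, true) else st) else st

def pvUpdP (K : Int) (p : Option Int) (v : Int) : Option Int :=
  if K ≤ v then some (match p with | none => v | some μ => min μ v) else p

def pvRepr (p : Option Int) : Int × Bool :=
  match p with
  | none => ((2000000000 : Int), false)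
  | some μ => (min 2000000000 μ, decide (μ ≤ 2000000000))

lemma pvStep_repr (K : Int) (p : Option Int) (v : Int) :
    pvStep K (pvRepr p) v = pvRepr (pvUpdP K p v) := by
  cases p <;> simp only [pvStep, pvUpdP, pvRepr, min_def, ge_iff_le] <;>
    split_ifs <;> simp_all [Prod.ext_iff] <;> omega

lemma pvFoldl_step_repr (K : Int) (l : List Int) (p : Option Int) :
    l.foldl (pvStep K) (pvRepr p) = pvRepr (l.foldl (pvUpdP K) p) := by
  induction l generalizing p with
  | nil => rfl
  | cons v t ih => simp only [List.foldl_cons, pvStep_repr, ih]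

lemma pvUpdP_eq_omin (K : Int) (p : Option Int) (v : Int) (h : K ≤ v) :
    pvUpdP K p v = pvOmin p (some v) := by
  cases p <;> simp [pvUpdP, pvOmin, h]

lemma pvFoldl_updP (K : Int) (l : List Int) (p : Option Int) :
    l.foldl (pvUpdP K) p = pvOmin p ((l.filter (fun v => K ≤ v)).min?) := by
  induction l generalizing p with
  | nil => simp [pvOmin_none]
  | cons v t ih =>
    by_cases h : K ≤ v
    · simp only [List.foldl_cons, ih, pvUpdP_eq_omin K p v h]
      have : (List.filter (fun v => decide (K ≤ v)) (v :: t)).min? =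
          pvOmin (some v) ((t.filter (fun v => K ≤ v)).min?) := by
        simp only [List.filter_cons, decide_eq_true h, if_true, List.min?_cons]
        cases ht : (t.filter (fun v => K ≤ v)).min? <;> simp [pvOmin, Option.elim]
      rw [this, pvOmin_assoc]
    · have hup : pvUpdP K p v = p := by simp [pvUpdP, h]
      simp only [List.foldl_cons, hup, ih, List.filter_cons, decide_eq_false h]
      simp

lemma pvCand_filter (num_list1 num_list2 : List Int) (K : Int) :
    ((num_list1.flatMap (fun x => num_list2.map (fun y => x + y))).filter (fun v => K ≤ v)) =
      pvCand num_list1 num_list2 K := by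
  simp only [pvCand, List.filter_flatMap, List.filter_map]
  rfl

lemma pvA_eq (num_list1 num_list2 : List Int) (K : Int) :
    get_min_pair num_list1 num_list2 K =
      match (pvCand num_list1 num_list2 K).min? with
      | none => K
      | some m => if m ≤ 2000000000 then m else K := by
  unfold get_min_pair
  rw [PySem.List.foldl_pyRange_zero_pyGetD' num_list1 0
    (fun st x => (PySem.List.pyRange 0 (num_list2.length : Int)).foldl (fun st j =>
      let val := x + PySem.List.pyGetD num_list2 j 0
      if val ≥ K then (if val ≤ st.1 then (val, true) else st) else st) st)]
  have hinner : ∀ (x : Int) (st : Int × Bool),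
      (PySem.List.pyRange 0 (num_list2.length : Int)).foldl (fun st j =>
        let val := x + PySem.List.pyGetD num_list2 j 0
        if val ≥ K then (if val ≤ st.1 then (val, true) else st) else st) st =
      (num_list2.map (fun y => x + y)).foldl (pvStep K) st := by
    intro x st
    show (PySem.List.pyRange 0 (num_list2.length : Int)).foldl
      (fun st j => pvStep K st (x + PySem.List.pyGetD num_list2 j 0)) st = _
    rw [PySem.List.foldl_pyRange_zero_pyGetD' num_list2 0 (fun st y => pvStep K st (x + y))]
    rw [List.foldl_map]
  simp only [hinner]
  rw [show (fun (st : Int × Bool) (x : Int) => (num_list2.map (fun y => x + y)).foldl (pvStep K) st)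
      = (fun st x => ((fun x => num_list2.map (fun y => x + y)) x).foldl (pvStep K) st) from rfl]
  rw [← List.foldl_flatMap]
  have h0 : ((2000000000 : Int), false) = pvRepr none := rfl
  rw [h0, pvFoldl_step_repr, pvFoldl_updP, pvCand_filter, pvOmin_none_left]
  cases hm : (pvCand num_list1 num_list2 K).min? with
  | none => simp [pvRepr]
  | some m =>
    by_cases h : m ≤ 2000000000
    · simp [pvRepr, h]
    · simp [pvRepr, h]

-- B-side characterisation -----------------------------------------------------

lemma pvBisectGo_spec (s : List Int) (t : Int) (hs : s.Pairwise (· ≤ ·)) :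
    ∀ (fuel lo hi : Nat), hi - lo ≤ fuel → lo ≤ hi → hi ≤ s.length →
    (∀ j, j < lo → ∀ (hj : j < s.length), s[j] < t) →
    (∀ j, hi ≤ j → ∀ (hj : j < s.length), t ≤ s[j]) →
    lo ≤ pvBisectGo fuel s t lo hi ∧ pvBisectGo fuel s t lo hi ≤ hi ∧
    (∀ j, j < pvBisectGo fuel s t lo hi → ∀ (hj : j < s.length), s[j] < t) ∧
    (∀ j, pvBisectGo fuel s t lo hi ≤ j → ∀ (hj : j < s.length), t ≤ s[j]) := by
  intro fuel
  induction fuel with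
  | zero =>
    intro lo hi hf hlh hhl hlow hhigh
    have heq : lo = hi := by omega
    subst heq
    exact ⟨le_refl _, le_refl _, hlow, hhigh⟩
  | succ f ih =>
    intro lo hi hf hlh hhl hlow hhigh
    by_cases h : lo < hi
    · simp only [pvBisectGo, h, if_true]
      have hmid : (lo + hi) / 2 < s.length := by omega
      have hget : s.getD ((lo + hi) / 2) 0 = s[(lo + hi) / 2] := List.getD_eq_getElem s 0 hmid
      have hmono := List.pairwise_iff_getElem.mp hs
      by_cases hc : s.getD ((lo + hi) / 2) 0 < t
      · simp only [hc, if_true]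
        have hlow' : ∀ j, j < (lo + hi) / 2 + 1 → ∀ (hj : j < s.length), s[j] < t := by
          intro j hj hjl
          have hle : s[j] ≤ s[(lo + hi) / 2] := by
            rcases Nat.lt_or_ge j ((lo + hi) / 2) with hlt | hge
            · exact hmono j ((lo + hi) / 2) hjl hmid hlt
            · have : j = (lo + hi) / 2 := by omega
              subst this; exact le_refl _
          rw [hget] at hc; omega
        obtain ⟨a, b, c, d⟩ := ih ((lo + hi) / 2 + 1) hi (by omega) (by omega) hhl hlow' hhigh
        exact ⟨by omega, b, c, d⟩
      · simp only [hc, if_false]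
        have hhigh' : ∀ j, (lo + hi) / 2 ≤ j → ∀ (hj : j < s.length), t ≤ s[j] := by
          intro j hj hjl
          have hle : s[(lo + hi) / 2] ≤ s[j] := by
            rcases Nat.lt_or_ge ((lo + hi) / 2) j with hlt | hge
            · exact hmono ((lo + hi) / 2) j hmid hjl hlt
            · have : j = (lo + hi) / 2 := by omega
              subst this; exact le_refl _
          rw [hget] at hc; omega
        obtain ⟨a, b, c, d⟩ := ih lo ((lo + hi) / 2) (by omega) (by omega) (by omega) hlow hhigh'
        exact ⟨a, by omega, c, d⟩
    · have heq : lo = hi := by omega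
      subst heq
      simp only [pvBisectGo, lt_irrefl, if_false]
      exact ⟨le_refl _, le_refl _, hlow, hhigh⟩

lemma pvInner_eq (num_list2 : List Int) (K x : Int) :
    (if pvBisect (PySem.List.sorted num_list2 (fun y => y)) (K - x) 0
          (PySem.List.sorted num_list2 (fun y => y)).length <
        (PySem.List.sorted num_list2 (fun y => y)).length then
      some (x + (PySem.List.sorted num_list2 (fun y => y)).getD
        (pvBisect (PySem.List.sorted num_list2 (fun y => y)) (K - x) 0
          (PySem.List.sorted num_list2 (fun y => y)).length) 0)
    else none) =
    (pvSumsF num_list2 K x).min? := by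
  have hs : (PySem.List.sorted num_list2 (fun y => y)).Pairwise (· ≤ ·) :=
    PySem.List.sorted_pairwise num_list2 (fun y => y)
  have hperm : (PySem.List.sorted num_list2 (fun y => y)).Perm num_list2 :=
    PySem.List.sorted_perm num_list2 (fun y => y) false
  set s := PySem.List.sorted num_list2 (fun y => y) with hsdef
  obtain ⟨h1, h2, h3, h4⟩ := pvBisectGo_spec s (K - x) hs (s.length - 0) 0 s.length
    (by omega) (by omega) (le_refl _) (by omega) (by intro j hj hjl; omega)
  have hbd : pvBisect s (K - x) 0 s.length = pvBisectGo (s.length - 0) s (K - x) 0 s.length := rfl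
  rw [hbd]
  set lo := pvBisectGo (s.length - 0) s (K - x) 0 s.length with hlodef
  by_cases hlt : lo < s.length
  · simp only [hlt, if_pos]
    symm
    rw [List.min?_eq_some_iff]
    constructor
    · have hmem : s[lo] ∈ num_list2 := hperm.mem_iff.mp (s.getElem_mem hlt)
      have hge : K ≤ x + s[lo] := by have := h4 lo (le_refl _) hlt; omega
      simp only [pvSumsF, List.mem_map, List.mem_filter]
      refine ⟨s[lo], ⟨hmem, by simpa using hge⟩, ?_⟩
      rw [List.getD_eq_getElem s 0 hlt]
    · intro b hb
      simp only [pvSumsF, List.mem_map, List.mem_filter] at hb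
      obtain ⟨y, ⟨hy2, hyK⟩, rfl⟩ := hb
      have hys : y ∈ s := hperm.mem_iff.mpr hy2
      obtain ⟨j, hjl, rfl⟩ := List.mem_iff_getElem.mp hys
      have hyK' : K ≤ x + s[j] := by simpa using hyK
      have hjlo : lo ≤ j := by
        by_contra hcon
        have := h3 j (by omega) hjl
        omega
      have : s[lo] ≤ s[j] := by
        rcases Nat.lt_or_ge lo j with hlt' | hge'
        · exact (List.pairwise_iff_getElem.mp hs) lo j hlt hjl hlt'
        · have : j = lo := by omega
          subst this; exact le_refl _
      rw [List.getD_eq_getElem s 0 hlt]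
      omega
  · simp only [hlt, if_false]
    symm
    rw [List.min?_eq_none_iff]
    have hnone : ∀ y ∈ num_list2, ¬ (K ≤ x + y) := by
      intro y hy hKy
      have hys : y ∈ s := hperm.mem_iff.mpr hy
      obtain ⟨j, hjl, rfl⟩ := List.mem_iff_getElem.mp hys
      have := h3 j (by omega) hjl
      omega
    simp only [pvSumsF, List.map_eq_nil_iff, List.filter_eq_nil_iff]
    intro y hy
    simpa using hnone y hy

lemma pvFoldl_omin (F : Int → List Int) (l : List Int) (p : Option Int) :
    l.foldl (fun best x => pvOmin best ((F x).min?)) p = pvOmin p ((l.flatMap F).min?) := by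
  induction l generalizing p with
  | nil => simp [pvOmin_none]
  | cons x t ih =>
    simp only [List.foldl_cons, ih, List.flatMap_cons, pvMin?_append, pvOmin_assoc]

lemma pvB_eq (num_list1 num_list2 : List Int) (K : Int) :
    get_min_pair_alt num_list1 num_list2 K =
      ((pvCand num_list1 num_list2 K).min?).getD K := by
  simp only [get_min_pair_alt]
  have hstep : (fun (best : Option Int) (x : Int) =>
      if pvBisect (PySem.List.sorted num_list2 fun y => y) (K - x) 0
            (PySem.List.sorted num_list2 fun y => y).length <
          (PySem.List.sorted num_list2 fun y => y).length then
        match best with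
        | none => some (x + (PySem.List.sorted num_list2 fun y => y).getD
            (pvBisect (PySem.List.sorted num_list2 fun y => y) (K - x) 0
              (PySem.List.sorted num_list2 fun y => y).length) 0)
        | some b =>
          if x + (PySem.List.sorted num_list2 fun y => y).getD
              (pvBisect (PySem.List.sorted num_list2 fun y => y) (K - x) 0
                (PySem.List.sorted num_list2 fun y => y).length) 0 < b then
            some (x + (PySem.List.sorted num_list2 fun y => y).getD
              (pvBisect (PySem.List.sorted num_list2 fun y => y) (K - x) 0
                (PySem.List.sorted num_list2 fun y => y).length) 0)
          else best
      else best) =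
      (fun best x => pvOmin best ((pvSumsF num_list2 K x).min?)) := by
    funext best x
    rw [← pvInner_eq num_list2 K x]
    by_cases hlt : pvBisect (PySem.List.sorted num_list2 fun y => y) (K - x) 0
        (PySem.List.sorted num_list2 fun y => y).length <
        (PySem.List.sorted num_list2 fun y => y).length
    · simp only [hlt, if_pos]
      generalize x + (PySem.List.sorted num_list2 fun y => y).getD
        (pvBisect (PySem.List.sorted num_list2 fun y => y) (K - x) 0
          (PySem.List.sorted num_list2 fun y => y).length) 0 = v
      cases best with
      | none => rfl
      | some b =>
        by_cases hv : v < b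
        · have hmin : min b v = v := by omega
          simp [pvOmin, hv, hmin]
        · have hmin : min b v = b := by omega
          simp [pvOmin, hv, hmin]
    · simp only [hlt, if_false]
      cases best <;> rfl
  rw [hstep, pvFoldl_omin (pvSumsF num_list2 K) num_list1 none, pvOmin_none_left]
  have hfc : List.flatMap (pvSumsF num_list2 K) num_list1 = pvCand num_list1 num_list2 K := rfl
  rw [hfc]
  cases hm : (pvCand num_list1 num_list2 K).min? <;> rfl

-- membership in the candidate list ------------------------------------------

lemma pvMem_cand {num_list1 num_list2 : List Int} {K v : Int} :
    v ∈ pvCand num_list1 num_list2 K ↔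
      ∃ x ∈ num_list1, ∃ y ∈ num_list2, v = x + y ∧ K ≤ x + y := by
  simp only [pvCand, pvSumsF, List.mem_flatMap, List.mem_map, List.mem_filter,
    decide_eq_true_eq]
  constructor
  · rintro ⟨x, hx, y, ⟨hy, hK⟩, rfl⟩
    exact ⟨x, hx, y, hy, rfl, hK⟩
  · rintro ⟨x, hx, y, hy, rfl, hK⟩
    exact ⟨x, hx, y, ⟨hy, hK⟩, rfl⟩

-- ===== VERDICT (by name: the statement is the Claim_ definition above) =====
theorem get_min_pair_spec : Claim_unchanged_get_min_pair := by
  intro num_list1 num_list2 K _hdom hnD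
  rw [pvA_eq, pvB_eq]
  cases hm : (pvCand num_list1 num_list2 K).min? with
  | none => rfl
  | some m =>
    simp only [Option.getD_some]
    by_cases h : m ≤ 2000000000
    · simp [h]
    · simp only [h, if_false]
      obtain ⟨hmem, hmin⟩ := List.min?_eq_some_iff.mp hm
      obtain ⟨x0, hx0, y0, hy0, _, hK0⟩ := pvMem_cand.mp hmem
      unfold D_get_min_pair at hnD
      push Not at hnD
      obtain ⟨x, hx, y, hy, hKxy, hbad⟩ := hnD ⟨x0, hx0, y0, hy0, hK0⟩
      have hs : x + y ∈ pvCand num_list1 num_list2 K :=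
        pvMem_cand.mpr ⟨x, hx, y, hy, rfl, hKxy⟩
      have hms := hmin _ hs
      have hmK : K ≤ m := by
        obtain ⟨x', _, y', _, rfl, hK'⟩ := pvMem_cand.mp hmem
        exact hK'
      omega

theorem get_min_pair_changed : Claim_changed_get_min_pair := by
  unfold Claim_changed_get_min_pair; decide

theorem get_min_pair_tight : Claim_exact_get_min_pair := by
  intro num_list1 num_list2 K _hdom hD
  obtain ⟨⟨x, hx, y, hy, hK⟩, hall⟩ := hD
  rw [pvA_eq, pvB_eq]
  cases hm : (pvCand num_list1 num_list2 K).min? with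
  | none =>
    exfalso
    have : pvCand num_list1 num_list2 K = [] := List.min?_eq_none_iff.mp hm
    have : x + y ∈ pvCand num_list1 num_list2 K := pvMem_cand.mpr ⟨x, hx, y, hy, rfl, hK⟩
    simp_all
  | some m =>
    obtain ⟨hmem, _⟩ := List.min?_eq_some_iff.mp hm
    obtain ⟨x', hx', y', hy', rfl, hK'⟩ := pvMem_cand.mp hmem
    obtain ⟨hbig, hne⟩ := hall x' hx' y' hy' hK'
    simp only [Option.getD_some, if_neg (by omega : ¬ x' + y' ≤ 2000000000)]
    exact fun hcon => hne hcon.symm
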